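-- pv_equiv track=rewrite | github.com/Aasthaengg/IBMdataset | Python_codes/p04020/s609779300.py | f
-- ===== SOURCE A (Python) =====
-- def f(lst):
--   res = 0
--   ex = 0
--   for a in lst:
--     ex += a
--     res += ex//2
--     ex %= 2
--   return res
-- ===== SOURCE B (Python) =====
-- def f(lst):
--   return sum(lst)//2
-- ===== Notes on version B (the rewrite author's own statement) =====
-- stated objective: simpler
-- what changed: Replaces the per-element carry-accumulator loop (running parity ex, res += ex//2) with the closed form sum(lst)//2, justified by the invariant 2*res + ex = sum of the prefix with 0 <= ex < 2.
import Mathlib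
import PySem

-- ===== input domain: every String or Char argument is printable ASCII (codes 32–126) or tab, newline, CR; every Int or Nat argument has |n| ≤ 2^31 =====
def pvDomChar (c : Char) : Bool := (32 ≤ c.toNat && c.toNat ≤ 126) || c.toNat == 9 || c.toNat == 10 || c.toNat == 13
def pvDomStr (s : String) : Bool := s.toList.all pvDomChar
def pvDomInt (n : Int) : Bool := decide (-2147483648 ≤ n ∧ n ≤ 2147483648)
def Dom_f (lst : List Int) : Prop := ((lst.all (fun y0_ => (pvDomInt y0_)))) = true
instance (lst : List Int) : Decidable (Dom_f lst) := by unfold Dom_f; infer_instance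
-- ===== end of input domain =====

-- B replaces A's carry-accumulator loop with the closed form sum(lst)//2 (simpler).


-- ===== PORT A =====
def f (lst : List Int) : Int :=
  (lst.foldl (fun (st : Int × Int) a =>
      let ex := st.2 + a
      (st.1 + PySem.Int.floordiv ex 2, PySem.Int.mod ex 2)) (0, 0)).1

-- ===== PORT B =====
def f_alt (lst : List Int) : Int := PySem.Int.floordiv lst.sum 2

-- ===== PRECONDITION & SPEC =====
def Spec_f (lst : List Int) (out : Int) : Prop := out = f_alt lst
instance (lst : List Int) (out : Int) : Decidable (Spec_f lst out) := by unfold Spec_f; infer_instance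

-- ===== CLAIM (what is proved, stated in full; the proofs are below) =====
def Claim_equal_f : Prop := ∀ (lst : List Int), Dom_f lst → Spec_f lst (f lst)

-- ===== LEMMAS AND PROOFS =====

theorem f_fold_inv (lst : List Int) (res ex : Int) (h0 : 0 ≤ ex) (h2 : ex < 2) :
    (lst.foldl (fun (st : Int × Int) a =>
      let ex := st.2 + a
      (st.1 + PySem.Int.floordiv ex 2, PySem.Int.mod ex 2)) (res, ex)).1
    = res + PySem.Int.floordiv (ex + lst.sum) 2 := by
  induction lst generalizing res ex with
  | nil =>
      simp only [List.foldl_nil, List.sum_nil, add_zero]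
      rw [PySem.Int.floordiv_eq_ediv_of_pos (by omega)]
      omega
  | cons a l ih =>
      simp only [List.foldl_cons]
      rw [ih (res + PySem.Int.floordiv (ex + a) 2) (PySem.Int.mod (ex + a) 2)
          (by rw [PySem.Int.mod_eq_emod_of_pos (by omega)]; omega)
          (by rw [PySem.Int.mod_eq_emod_of_pos (by omega)]; omega)]
      rw [PySem.Int.floordiv_eq_ediv_of_pos (by omega),
          PySem.Int.floordiv_eq_ediv_of_pos (by omega),
          PySem.Int.floordiv_eq_ediv_of_pos (by omega),
          PySem.Int.mod_eq_emod_of_pos (by omega)]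
      simp only [List.sum_cons]
      omega

-- ===== VERDICT (by name: the statement is the Claim_ definition above) =====
theorem f_spec : Claim_equal_f := by
  intro lst _
  unfold Spec_f f f_alt
  rw [f_fold_inv lst 0 0 (by omega) (by omega)]
  simp
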